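-- pv_equiv track=rewrite | github.com/nidhiatwork/Python_Coding_Practice | DynamicProgramming/Basic/10_FriendsPairing.py | dp2_countFriendsPairings
-- ===== SOURCE A (Python) =====
-- def dp2_countFriendsPairings(n):
-- 	if n<=2:
-- 		return n
-- 	a=1
-- 	b=2
-- 	for i in range(3,n+1):
-- 		c = b + (i-1)*a
-- 		a=b
-- 		b=c
-- 	return b
-- ===== SOURCE B (Python) =====
-- def dp2_countFriendsPairings(n):
--     if n <= 2:
--         return n
--     total = 0
--     term = 1  # term = n! // ((n-2k)! * k! * 2**k): arrangements with exactly k pairs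
--     for k in range(n // 2):
--         total += term
--         term = term * (n - 2 * k) * (n - 2 * k - 1) // (2 * (k + 1))
--     return total + term
-- ===== Notes on version B (the rewrite author's own statement) =====
-- stated objective: alternative
-- what changed: B evaluates the closed-form involution-count sum over the number of pairs k (term k = n!/((n-2k)! k! 2^k), updated multiplicatively with exact integer division) instead of A's forward sweep of the pairing recurrence.
import Mathlib
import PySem

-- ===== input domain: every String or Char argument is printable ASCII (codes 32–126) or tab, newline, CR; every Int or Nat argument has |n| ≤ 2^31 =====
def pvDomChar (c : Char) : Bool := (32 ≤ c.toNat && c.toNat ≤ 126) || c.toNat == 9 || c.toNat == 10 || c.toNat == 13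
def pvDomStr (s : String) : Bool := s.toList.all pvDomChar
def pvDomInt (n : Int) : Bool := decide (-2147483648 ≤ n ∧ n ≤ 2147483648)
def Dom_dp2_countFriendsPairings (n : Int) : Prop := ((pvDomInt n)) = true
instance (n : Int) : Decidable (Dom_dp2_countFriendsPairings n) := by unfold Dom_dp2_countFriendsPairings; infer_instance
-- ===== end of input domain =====

-- B replaces A's recurrence sweep by the closed-form involution-count sum
-- sum_k n!/((n-2k)!*k!*2^k) over the number of pairs k, with a factorial table; objective: alternative.

-- ===== PORT A =====
def dp2_countFriendsPairings (n : Int) : Int :=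
  if n ≤ 2 then n
  else
    ((PySem.List.pyRange 3 (n + 1) 1).foldl
      (fun (s : Int × Int) i => (s.2, s.2 + (i - 1) * s.1)) (1, 2)).2

-- ===== PORT B =====
-- Python's exact '//' is PySem.Int.floordiv; the loop state is the pair (total, term).
def dp2_countFriendsPairings_alt (n : Int) : Int :=
  if n ≤ 2 then n
  else
    let s := (PySem.List.pyRange 0 (PySem.Int.floordiv n 2) 1).foldl
      (fun (s : Int × Int) k =>
        (s.1 + s.2, PySem.Int.floordiv (s.2 * (n - 2 * k) * (n - 2 * k - 1)) (2 * (k + 1)))) (0, 1)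
    s.1 + s.2

-- ===== PRECONDITION & SPEC =====
def Spec_dp2_countFriendsPairings (n : Int) (out : Int) : Prop := out = dp2_countFriendsPairings_alt n
instance (n : Int) (out : Int) : Decidable (Spec_dp2_countFriendsPairings n out) := by unfold Spec_dp2_countFriendsPairings; infer_instance

-- ===== CLAIM (what is proved, stated in full; the proofs are below) =====
def Claim_equal_dp2_countFriendsPairings : Prop := ∀ (n : Int), Dom_dp2_countFriendsPairings n → Spec_dp2_countFriendsPairings n (dp2_countFriendsPairings n)

-- ===== LEMMAS AND PROOFS =====

-- the friends-pairing numbers, as A's recurrence computes them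
def pvF : Nat → Int
  | 0 => 0
  | 1 => 1
  | 2 => 2
  | (k + 3) => pvF (k + 2) + ((k : Int) + 2) * pvF (k + 1)

-- pvC n k = number of arrangements of n friends containing exactly k pairs
def pvC : Nat → Nat → Nat
  | _, 0 => 1
  | 0, _ + 1 => 0
  | 1, _ + 1 => 0
  | (n + 2), (k + 1) => pvC (n + 1) (k + 1) + (n + 1) * pvC n k

lemma pvA_loop (m : Nat) :
    (PySem.List.pyRange 3 (3 + (m : Int)) 1).foldl
      (fun (s : Int × Int) i => (s.2, s.2 + (i - 1) * s.1)) (1, 2)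
      = (pvF (m + 1), pvF (m + 2)) := by
  induction m with
  | zero => simp [PySem.List.pyRange_one_eq_nil, pvF]
  | succ k ih =>
      have h : (3 : Int) + (k + 1 : Nat) = (3 + (k : Int)) + 1 := by push_cast; ring
      rw [h, PySem.List.pyRange_one_succ_right (by omega), List.foldl_append, ih]
      simp only [List.foldl_cons, List.foldl_nil]
      show (pvF (k + 2), pvF (k + 2) + (3 + (k : Int) - 1) * pvF (k + 1)) = _
      have e2 : pvF (k + 1 + 2) = pvF (k + 2) + ((k : Int) + 2) * pvF (k + 1) := rfl
      rw [e2, show k + 1 + 1 = k + 2 from rfl]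
      congr 1
      ring

lemma pvC_vanish (n k : Nat) (h : n < 2 * k) : pvC n k = 0 := by
  fun_induction pvC n k with
  | case1 => omega
  | case2 => rfl
  | case3 => rfl
  | case4 n k ih1 ih2 =>
      rw [ih1 (by omega), ih2 (by omega)]
      ring

lemma pvC_mul (n k : Nat) : 2 * k ≤ n →
    pvC n k * ((n - 2 * k).factorial * k.factorial * 2 ^ k) = n.factorial := by
  fun_induction pvC n k with
  | case1 n => intro _; simp [Nat.factorial]
  | case2 k => omega
  | case3 k => omega
  | case4 n k ih1 ih2 =>
      intro h
      by_cases hc : 2 * k + 1 ≤ n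
      · have e1 := ih1 (by omega)
        have e2 := ih2 (by omega)
        obtain ⟨m, rfl⟩ : ∃ m, n = 2 * k + 1 + m := ⟨n - (2 * k + 1), by omega⟩
        rw [show 2 * k + 1 + m + 2 - 2 * (k + 1) = m + 1 by omega]
        rw [show 2 * k + 1 + m + 1 - 2 * (k + 1) = m by omega] at e1
        rw [show 2 * k + 1 + m - 2 * k = m + 1 by omega] at e2
        have hz : ((pvC (2*k+1+m+1) (k+1) + (2*k+1+m+1) * pvC (2*k+1+m) k) *
            ((m+1).factorial * (k+1).factorial * 2 ^ (k+1)) : Int)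
            = ((2*k+1+m+2).factorial : Int) := by
          have e1' : ((pvC (2*k+1+m+1) (k+1) : Int)) * ((m.factorial : Int) * ((k+1).factorial : Int) * 2 ^ (k+1)) = ((2*k+1+m+1).factorial : Int) := by exact_mod_cast congrArg (Nat.cast : Nat → Int) e1
          have e2' : ((pvC (2*k+1+m) k : Int)) * (((m+1).factorial : Int) * (k.factorial : Int) * 2 ^ k) = ((2*k+1+m).factorial : Int) := by exact_mod_cast congrArg (Nat.cast : Nat → Int) e2
          have f1 : ((m+1).factorial : Int) = ((m:Int)+1) * (m.factorial : Int) := by exact_mod_cast congrArg (Nat.cast : Nat → Int) (Nat.factorial_succ m)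
          have f2 : ((k+1).factorial : Int) = ((k:Int)+1) * (k.factorial : Int) := by exact_mod_cast congrArg (Nat.cast : Nat → Int) (Nat.factorial_succ k)
          have f3 : ((2*k+1+m+2).factorial : Int) = (2*(k:Int)+(m:Int)+3) * ((2*k+1+m+1).factorial : Int) := by
            have := Nat.factorial_succ (2*k+1+m+1); push_cast [this]; ring
          have f4 : ((2*k+1+m+1).factorial : Int) = (2*(k:Int)+(m:Int)+2) * ((2*k+1+m).factorial : Int) := by
            have := Nat.factorial_succ (2*k+1+m); push_cast [this]; ring
          rw [f3]
          rw [f4] at e1' ⊢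
          rw [f2, pow_succ] at e1' ⊢
          rw [f1] at e2' ⊢
          linear_combination ((m:Int)+1) * e1' + (2*(k:Int)+(m:Int)+2) * 2 * ((k:Int)+1) * e2'
        exact_mod_cast hz
      · have hn : n = 2 * k := by omega
        subst hn
        have e2 := ih2 (by omega)
        rw [show 2 * k - 2 * k = 0 by omega] at e2
        simp only [Nat.factorial_zero, one_mul] at e2
        have hv : pvC (2 * k + 1) (k + 1) = 0 := pvC_vanish _ _ (by omega)
        show (pvC (2 * k + 1) (k + 1) + (2 * k + 1) * pvC (2 * k) k) * _ = _
        rw [hv, show 2 * k + 2 - 2 * (k + 1) = 0 by omega]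
        have e2' : ((pvC (2*k) k : Int)) * ((k.factorial : Int) * 2 ^ k) = ((2*k).factorial : Int) := by
          exact_mod_cast congrArg (Nat.cast : Nat → Int) e2
        have hz : (((0 + (2 * k + 1) * pvC (2 * k) k) *
            (Nat.factorial 0 * (k+1).factorial * 2 ^ (k+1))) : Int) = (((2*k+2).factorial : Int)) := by
          have f2 : ((k+1).factorial : Int) = ((k:Int)+1) * (k.factorial : Int) := by
            exact_mod_cast congrArg (Nat.cast : Nat → Int) (Nat.factorial_succ k)
          have f3 : ((2*k+2).factorial : Int) = (2*(k:Int)+2) * (2*(k:Int)+1) * ((2*k).factorial : Int) := by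
            have h1 := Nat.factorial_succ (2*k+1)
            have h2 := Nat.factorial_succ (2*k)
            push_cast [h1, h2]; ring
          rw [f3, f2, pow_succ]
          linear_combination (2*(k:Int)+1) * 2 * ((k:Int)+1) * e2'
        exact_mod_cast hz

def pvT (n : Nat) : Int := ∑ k ∈ Finset.range (n + 1), (pvC n k : Int)

lemma pvT_rec (n : Nat) : pvT (n + 2) = pvT (n + 1) + ((n : Int) + 1) * pvT n := by
  have h1 : pvT (n+2) = (∑ k ∈ Finset.range (n+2), (pvC (n+2) (k+1) : Int)) + (pvC (n+2) 0 : Int) :=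
    Finset.sum_range_succ' _ _
  have h2 : (∑ k ∈ Finset.range (n+2), (pvC (n+1) (k+1) : Int)) + (pvC (n+1) 0 : Int)
      = ∑ k ∈ Finset.range (n+2+1), (pvC (n+1) k : Int) := (Finset.sum_range_succ' (fun k => (pvC (n+1) k : Int)) (n+2)).symm
  have h3 : (∑ k ∈ Finset.range (n+2+1), (pvC (n+1) k : Int)) = pvT (n+1) + (pvC (n+1) (n+2) : Int) :=
    Finset.sum_range_succ _ _
  have h4 : (∑ k ∈ Finset.range (n+2), (pvC n k : Int)) = pvT n + (pvC n (n+1) : Int) :=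
    Finset.sum_range_succ _ _
  have hv1 : pvC (n+1) (n+2) = 0 := pvC_vanish _ _ (by omega)
  have hv2 : pvC n (n+1) = 0 := pvC_vanish _ _ (by omega)
  have hs : ∀ k ∈ Finset.range (n+2),
      ((pvC (n+2) (k+1) : Int)) = (pvC (n+1) (k+1) : Int) + ((n:Int)+1) * (pvC n k : Int) := by
    intro k _
    rw [show pvC (n+2) (k+1) = pvC (n+1) (k+1) + (n+1) * pvC n k from rfl]
    push_cast; ring
  rw [h1, Finset.sum_congr rfl hs, Finset.sum_add_distrib, ← Finset.mul_sum, h4]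
  rw [hv1] at h3
  rw [hv2] at h4
  rw [show pvC (n+2) 0 = 1 from rfl, show pvC (n+1) 0 = 1 from rfl] at *
  rw [hv2]
  push_cast at *
  linarith [h2, h3]

lemma pvT_eq_pvF (n : Nat) : pvT (n + 1) = pvF (n + 1) := by
  induction n using Nat.twoStepInduction with
  | zero => decide
  | one => decide
  | more n ih1 ih2 =>
      have := pvT_rec (n + 1)
      rw [show pvF (n + 3) = pvF (n + 2) + ((n : Int) + 2) * pvF (n + 1) from rfl]
      rw [show n + 1 + 2 = n + 3 from rfl, show n + 1 + 1 = n + 2 from rfl] at this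
      rw [this, ih1, ih2]
      push_cast; ring

lemma pvSum_trunc (n : Nat) : (∑ k ∈ Finset.range (n / 2 + 1), (pvC n k : Int)) = pvT n := by
  unfold pvT
  apply Finset.sum_subset ?_ ?_
  · intro k hk; simp only [Finset.mem_range] at *; omega
  · intro k hk hnk
    simp only [Finset.mem_range] at hk hnk
    rw [pvC_vanish n k (by omega)]
    simp

-- one multiplicative step of B: from term k to term k+1 (exact division)
lemma pvStep (n k : Nat) (hk : k < n / 2) :
    PySem.Int.floordiv ((pvC n k : Int) * ((n : Int) - 2 * (k : Int)) * ((n : Int) - 2 * (k : Int) - 1))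
        (2 * ((k : Int) + 1))
      = (pvC n (k + 1) : Int) := by
  obtain ⟨m, rfl⟩ : ∃ m, n = 2 * k + 2 + m := ⟨n - (2 * k + 2), by omega⟩
  have e1 := pvC_mul (2 * k + 2 + m) k (by omega)
  have e2 := pvC_mul (2 * k + 2 + m) (k + 1) (by omega)
  rw [show 2 * k + 2 + m - 2 * k = m + 2 by omega] at e1
  rw [show 2 * k + 2 + m - 2 * (k + 1) = m by omega] at e2
  have hX : 0 < m.factorial * k.factorial * 2 ^ k := by positivity
  have key : pvC (2 * k + 2 + m) k * ((m + 2) * (m + 1)) = pvC (2 * k + 2 + m) (k + 1) * (2 * (k + 1)) := by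
    apply Nat.eq_of_mul_eq_mul_right hX
    calc pvC (2 * k + 2 + m) k * ((m + 2) * (m + 1)) * (m.factorial * k.factorial * 2 ^ k)
        = pvC (2 * k + 2 + m) k * ((m + 2).factorial * k.factorial * 2 ^ k) := by
          rw [Nat.factorial_succ (m + 1), Nat.factorial_succ m]; ring
      _ = (2 * k + 2 + m).factorial := e1
      _ = pvC (2 * k + 2 + m) (k + 1) * (m.factorial * (k + 1).factorial * 2 ^ (k + 1)) := e2.symm
      _ = pvC (2 * k + 2 + m) (k + 1) * (2 * (k + 1)) * (m.factorial * k.factorial * 2 ^ k) := by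
          rw [Nat.factorial_succ k, pow_succ]; ring
  rw [show ((2 * k + 2 + m : Nat) : Int) - 2 * (k : Int) = ((m + 2 : Nat) : Int) by push_cast; ring]
  rw [show ((m + 2 : Nat) : Int) - 1 = ((m + 1 : Nat) : Int) by push_cast; ring]
  rw [show ((pvC (2 * k + 2 + m) k : Nat) : Int) * ((m + 2 : Nat) : Int) * ((m + 1 : Nat) : Int)
      = ((pvC (2 * k + 2 + m) k * ((m + 2) * (m + 1)) : Nat) : Int) by push_cast; ring]
  rw [show (2 : Int) * ((k : Int) + 1) = ((2 * (k + 1) : Nat) : Int) by push_cast; ring]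
  rw [PySem.Int.floordiv_natCast, key, Nat.mul_div_cancel _ (by omega)]

-- B's loop invariant: after j iterations the state is (sum of the first j terms, term j)
lemma pvB_loop (n j : Nat) (hj : j ≤ n / 2) :
    (PySem.List.pyRange 0 (j : Int) 1).foldl
      (fun (s : Int × Int) k =>
        (s.1 + s.2, PySem.Int.floordiv (s.2 * ((n : Int) - 2 * k) * ((n : Int) - 2 * k - 1)) (2 * (k + 1)))) (0, 1)
      = (∑ k ∈ Finset.range j, (pvC n k : Int), (pvC n j : Int)) := by
  induction j with
  | zero => simp [PySem.List.pyRange_one_eq_nil, pvC]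
  | succ i ih =>
      have h : ((i + 1 : Nat) : Int) = (i : Int) + 1 := by push_cast; ring
      rw [h, PySem.List.pyRange_one_succ_right (by omega), List.foldl_append, ih (by omega)]
      simp only [List.foldl_cons, List.foldl_nil]
      rw [pvStep n i (by omega), Finset.sum_range_succ]

-- ===== VERDICT (by name: the statement is the Claim_ definition above) =====
theorem dp2_countFriendsPairings_spec : Claim_equal_dp2_countFriendsPairings := by
  intro n _
  unfold Spec_dp2_countFriendsPairings dp2_countFriendsPairings dp2_countFriendsPairings_alt
  by_cases h : n ≤ 2
  · simp [h]
  · simp only [h, if_false]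
    obtain ⟨N, rfl⟩ : ∃ N : Nat, n = (N : Int) := ⟨n.toNat, by omega⟩
    have hN : 3 ≤ N := by omega
    -- A computes pvF N
    rw [show ((N : Int)) + 1 = 3 + ((N - 2 : Nat) : Int) by omega, pvA_loop (N - 2),
      show N - 2 + 2 = N by omega]
    -- B computes the truncated sum of pvC N
    rw [show PySem.Int.floordiv (N : Int) 2 = ((N / 2 : Nat) : Int) from
      by exact_mod_cast PySem.Int.floordiv_natCast N 2]
    rw [pvB_loop N (N / 2) le_rfl]
    rw [show (∑ k ∈ Finset.range (N / 2), (pvC N k : Int)) + (pvC N (N / 2) : Int)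
        = ∑ k ∈ Finset.range (N / 2 + 1), (pvC N k : Int) from (Finset.sum_range_succ _ _).symm]
    rw [pvSum_trunc N, show N = (N - 1) + 1 by omega, pvT_eq_pvF (N - 1)]
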